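-- pv_equiv track=rewrite | github.com/benuski/recordsmanagement | processing/central_file.py | get_nested_val
-- ===== SOURCE A (Python) =====
-- SCHEMA_MAP = {
--     'state': ('schedule_metadata', 'state'),
--     'agency_name': ('schedule_metadata', 'agency_name'),
--     'schedule_type': ('schedule_metadata', 'schedule_type'),
--     'schedule_id': ('schedule_metadata', 'schedule_id'),
--     'url': ('schedule_metadata', 'url'),
--
--     'series_id': ('series_metadata', 'series_id'),
--     'series_title': ('series_metadata', 'series_title'),
--     'series_description': ('series_metadata', 'series_description'),
--     'legal_citation': ('series_metadata', 'legal_citation'),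
--
--     'retention_statement': ('retention_rules', 'trigger_desc'),
--     'trigger_event': ('retention_rules', 'trigger_event'),
--     'retention_years': ('retention_rules', 'duration_years'),
--     'retention_months': ('retention_rules', 'duration_months'),
--     'disposition': ('retention_rules', 'disposition_method'),
--     'confidential': ('retention_rules', 'confidential_flag'),
--
--     'last_checked': ('tracking_data', 'last_checked'),
--     'last_updated': ('tracking_data', 'last_updated_by_state'),
--     'next_update': ('tracking_data', 'next_update_due'),
--     'comments': ('tracking_data', 'comments'),
--
--     'rsin': ('state_specific_attributes', 'rsin')
-- }
--
-- def get_nested_val(record: dict, flat_key: str):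
--     """Helper to safely retrieve a value from nested dict using flat key mapping."""
--     if flat_key not in SCHEMA_MAP:
--         return record.get(flat_key)
--     path = SCHEMA_MAP[flat_key]
--     target = record
--     for step in path:
--         if isinstance(target, dict):
--             target = target.get(step)
--         else:
--             return None
--     return target
-- ===== SOURCE B (Python) =====
-- SCHEMA_MAP = {
--     'state': ('schedule_metadata', 'state'),
--     'agency_name': ('schedule_metadata', 'agency_name'),
--     'schedule_type': ('schedule_metadata', 'schedule_type'),
--     'schedule_id': ('schedule_metadata', 'schedule_id'),
--     'url': ('schedule_metadata', 'url'),
--     'series_id': ('series_metadata', 'series_id'),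
--     'series_title': ('series_metadata', 'series_title'),
--     'series_description': ('series_metadata', 'series_description'),
--     'legal_citation': ('series_metadata', 'legal_citation'),
--     'retention_statement': ('retention_rules', 'trigger_desc'),
--     'trigger_event': ('retention_rules', 'trigger_event'),
--     'retention_years': ('retention_rules', 'duration_years'),
--     'retention_months': ('retention_rules', 'duration_months'),
--     'disposition': ('retention_rules', 'disposition_method'),
--     'confidential': ('retention_rules', 'confidential_flag'),
--     'last_checked': ('tracking_data', 'last_checked'),
--     'last_updated': ('tracking_data', 'last_updated_by_state'),
--     'next_update': ('tracking_data', 'next_update_due'),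
--     'comments': ('tracking_data', 'comments'),
--     'rsin': ('state_specific_attributes', 'rsin')
-- }
--
-- # Inverted index: (section, field) -> flat key.
-- REVERSE_MAP = {path: flat for flat, path in SCHEMA_MAP.items()}
--
-- def get_nested_val(record: dict, flat_key: str):
--     """Flatten the whole record once through the inverted schema index, then one flat lookup."""
--     if flat_key not in SCHEMA_MAP:
--         return record.get(flat_key)
--     flat = {}
--     for section, inner in record.items():
--         if isinstance(inner, dict):
--             for field, value in inner.items():
--                 fk = REVERSE_MAP.get((section, field))
--                 if fk is not None:
--                     flat[fk] = value
--     return flat.get(flat_key)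
-- ===== Notes on version B (the rewrite author's own statement) =====
-- stated objective: alternative
-- what changed: Instead of following the mapped path down into the nested record (A's per-step loop with isinstance guards), B precomputes an inverted index REVERSE_MAP ((section, field) -> flat key), flattens the entire record into one flat dict in a single pass over its sections and fields, and answers with a single flat lookup.
-- outside the precondition, e.g. on get_nested_val({'x': {'y': 'z'}}, 'x'): A returns {'y': 'z'}, B returns {'y': 'z'}
import Mathlib
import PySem

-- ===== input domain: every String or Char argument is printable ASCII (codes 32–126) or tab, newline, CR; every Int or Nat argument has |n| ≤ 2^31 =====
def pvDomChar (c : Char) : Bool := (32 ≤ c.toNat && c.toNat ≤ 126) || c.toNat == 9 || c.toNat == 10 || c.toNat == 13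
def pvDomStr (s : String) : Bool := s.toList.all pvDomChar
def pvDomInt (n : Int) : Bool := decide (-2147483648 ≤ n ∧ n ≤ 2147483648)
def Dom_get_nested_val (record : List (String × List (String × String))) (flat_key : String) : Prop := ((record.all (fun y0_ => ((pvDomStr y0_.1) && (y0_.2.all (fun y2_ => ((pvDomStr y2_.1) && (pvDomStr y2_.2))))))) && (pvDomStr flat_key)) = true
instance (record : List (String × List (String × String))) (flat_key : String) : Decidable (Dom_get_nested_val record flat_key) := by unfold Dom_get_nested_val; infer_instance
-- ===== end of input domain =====

-- B replaces A's path-directed descent by an inverted index (section, field) → flat key and a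
-- single flattening pass over the whole record followed by one flat lookup; alternative algorithm, not faster.
-- Shared module-level constant: SCHEMA_MAP (dict flat_key -> (section, field)), insertion order.
def SCHEMA_MAP : PySem.Dict String (String × String) := PySem.Dict.mk
  [ ("state", ("schedule_metadata", "state")),
    ("agency_name", ("schedule_metadata", "agency_name")),
    ("schedule_type", ("schedule_metadata", "schedule_type")),
    ("schedule_id", ("schedule_metadata", "schedule_id")),
    ("url", ("schedule_metadata", "url")),
    ("series_id", ("series_metadata", "series_id")),
    ("series_title", ("series_metadata", "series_title")),
    ("series_description", ("series_metadata", "series_description")),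
    ("legal_citation", ("series_metadata", "legal_citation")),
    ("retention_statement", ("retention_rules", "trigger_desc")),
    ("trigger_event", ("retention_rules", "trigger_event")),
    ("retention_years", ("retention_rules", "duration_years")),
    ("retention_months", ("retention_rules", "duration_months")),
    ("disposition", ("retention_rules", "disposition_method")),
    ("confidential", ("retention_rules", "confidential_flag")),
    ("last_checked", ("tracking_data", "last_checked")),
    ("last_updated", ("tracking_data", "last_updated_by_state")),
    ("next_update", ("tracking_data", "next_update_due")),
    ("comments", ("tracking_data", "comments")),
    ("rsin", ("state_specific_attributes", "rsin")) ]

-- ===== PORT A =====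
-- A's loop variable `target` is dynamically typed: the outer record, an inner dict,
-- a string, None, or an early `return None`. We model it with an explicit state type.
inductive ATarget : Type
  | tRec  : ATarget                                 -- target is the outer record dict
  | tDict : List (String × String) → ATarget        -- target is an inner dict
  | tStr  : String → ATarget                        -- target is a string value
  | tNone : ATarget                                 -- target is None
  | tRet  : ATarget                                 -- early `return None` happened
deriving DecidableEq, Repr

-- one iteration of `for step in path: if isinstance(target, dict): target = target.get(step) else: return None`
def aStep (record : List (String × List (String × String))) (t : ATarget) (step : String) : ATarget :=
  match t with
  | ATarget.tRec =>                                  -- isinstance(target, dict) is True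
      match (PySem.Dict.mk record).get? step with
      | some d => ATarget.tDict d
      | none   => ATarget.tNone
  | ATarget.tDict d =>                               -- isinstance(target, dict) is True
      match (PySem.Dict.mk d).get? step with
      | some v => ATarget.tStr v
      | none   => ATarget.tNone
  | ATarget.tStr _ => ATarget.tRet                   -- not a dict: return None
  | ATarget.tNone  => ATarget.tRet                   -- not a dict: return None
  | ATarget.tRet   => ATarget.tRet                   -- already returned

def get_nested_val (record : List (String × List (String × String))) (flat_key : String) : Option String :=
  match SCHEMA_MAP.get? flat_key with
  | none =>
      -- `return record.get(flat_key)`: the looked-up value is an inner dict, not a String;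
      -- Pre_ excludes inputs where the key is present, so the result here is None.
      none
  | some path =>
      -- target = record; for step in (path.1, path.2): …; return target
      match [path.1, path.2].foldl (aStep record) ATarget.tRec with
      | ATarget.tStr v => some v
      | _ => none   -- final target is None (or an early return); tRec/tDict are unreachable after two steps

-- ===== PORT B =====
-- REVERSE_MAP = {path: flat for flat, path in SCHEMA_MAP.items()}
def REVERSE_MAP : PySem.Dict (String × String) String :=
  PySem.Dict.mk (SCHEMA_MAP.items.map (fun p => (p.2, p.1)))

-- inner loop body: `fk = REVERSE_MAP.get((section, field)); if fk is not None: flat[fk] = value`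
def bInner (sec : String) (flat : PySem.Dict String String) (q : String × String) :
    PySem.Dict String String :=
  match REVERSE_MAP.get? (sec, q.1) with
  | some fk => flat.insert fk q.2
  | none    => flat

-- outer loop body: `for field, value in inner.items(): …` (the `isinstance(inner, dict)` guard
-- is identically true under the declared type, so the port iterates directly)
def bOuter (flat : PySem.Dict String String) (p : String × List (String × String)) :
    PySem.Dict String String :=
  p.2.foldl (bInner p.1) flat

def get_nested_val_alt (record : List (String × List (String × String))) (flat_key : String) : Option String :=
  if (SCHEMA_MAP.get? flat_key).isNone then
    -- `return record.get(flat_key)`: excluded by Pre_ unless absent, hence None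
    none
  else
    -- flat = {}; for section, inner in record.items(): …; return flat.get(flat_key)
    (record.foldl bOuter PySem.Dict.empty).get? flat_key

-- ===== PRECONDITION & SPEC =====
-- Pre_ excludes (a) inputs where flat_key is unmapped yet present in the record: there A returns
-- record[flat_key], an inner dict, which is not a value of the declared Option String type; and
-- (b) association lists with duplicate section keys or duplicate field keys inside a section,
-- which correspond to no Python dict, so first-vs-last-match behaviour there is accidental.
def Pre_get_nested_val (record : List (String × List (String × String))) (flat_key : String) : Prop :=
  ((SCHEMA_MAP.get? flat_key).isSome = true ∨ (PySem.Dict.mk record).get? flat_key = none)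
  ∧ (record.map Prod.fst).Nodup
  ∧ ∀ p ∈ record, (p.2.map Prod.fst).Nodup
instance (record : List (String × List (String × String))) (flat_key : String) : Decidable (Pre_get_nested_val record flat_key) := by unfold Pre_get_nested_val; infer_instance

def pvWitness_get_nested_val : (List (String × List (String × String))) × String :=
  ([("schedule_metadata", [("state", "CA")])], "state")

def Spec_get_nested_val (record : List (String × List (String × String))) (flat_key : String) (out : Option String) : Prop := out = get_nested_val_alt record flat_key
instance (record : List (String × List (String × String))) (flat_key : String) (out : Option String) : Decidable (Spec_get_nested_val record flat_key out) := by unfold Spec_get_nested_val; infer_instance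

-- ===== CLAIM (what is proved, stated in full; the proofs are below) =====
def Claim_equal_get_nested_val : Prop := ∀ (record : List (String × List (String × String))) (flat_key : String), Dom_get_nested_val record flat_key → Pre_get_nested_val record flat_key → Spec_get_nested_val record flat_key (get_nested_val record flat_key)

-- ===== LEMMAS AND PROOFS =====

-- soundness of the inverted index: a hit in REVERSE_MAP names a genuine SCHEMA_MAP entry
theorem rev_sound (q : String × String) (fk : String)
    (h : REVERSE_MAP.get? q = some fk) : SCHEMA_MAP.get? fk = some q := by
  have hm := PySem.Dict.mem_items_of_get?_eq_some _ h
  simp only [REVERSE_MAP, SCHEMA_MAP, List.map, List.mem_cons,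
    List.not_mem_nil, or_false, Prod.mk.injEq] at hm
  rcases hm with ⟨h1, h2⟩ | ⟨h1, h2⟩ | ⟨h1, h2⟩ | ⟨h1, h2⟩ | ⟨h1, h2⟩ | ⟨h1, h2⟩ | ⟨h1, h2⟩ |
    ⟨h1, h2⟩ | ⟨h1, h2⟩ | ⟨h1, h2⟩ | ⟨h1, h2⟩ | ⟨h1, h2⟩ | ⟨h1, h2⟩ | ⟨h1, h2⟩ | ⟨h1, h2⟩ |
    ⟨h1, h2⟩ | ⟨h1, h2⟩ | ⟨h1, h2⟩ | ⟨h1, h2⟩ | ⟨h1, h2⟩ <;> subst h1 <;> subst h2 <;> decide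

-- completeness: the SCHEMA_MAP entry for flat_key is found by the inverted index
theorem rev_complete (fk : String) (q : String × String)
    (h : SCHEMA_MAP.get? fk = some q) : REVERSE_MAP.get? q = some fk := by
  have hm := PySem.Dict.mem_items_of_get?_eq_some _ h
  simp only [SCHEMA_MAP, List.mem_cons, List.not_mem_nil, or_false,
    Prod.mk.injEq] at hm
  rcases hm with ⟨h1, h2⟩ | ⟨h1, h2⟩ | ⟨h1, h2⟩ | ⟨h1, h2⟩ | ⟨h1, h2⟩ | ⟨h1, h2⟩ | ⟨h1, h2⟩ |
    ⟨h1, h2⟩ | ⟨h1, h2⟩ | ⟨h1, h2⟩ | ⟨h1, h2⟩ | ⟨h1, h2⟩ | ⟨h1, h2⟩ | ⟨h1, h2⟩ | ⟨h1, h2⟩ |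
    ⟨h1, h2⟩ | ⟨h1, h2⟩ | ⟨h1, h2⟩ | ⟨h1, h2⟩ | ⟨h1, h2⟩ <;> subst h1 <;> subst h2 <;> decide

-- an inner pass over fields that never hits the target path leaves flat.get? flat_key unchanged
theorem inner_skip (flat_key s f : String) (hs : SCHEMA_MAP.get? flat_key = some (s, f))
    (sec : String) (inner : List (String × String)) (flat : PySem.Dict String String)
    (hne : ∀ q ∈ inner, (sec, q.1) ≠ (s, f)) :
    (inner.foldl (bInner sec) flat).get? flat_key = flat.get? flat_key := by
  induction inner generalizing flat with
  | nil => rfl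
  | cons q rest ih =>
    simp only [List.foldl]
    rw [ih _ (fun q hq => hne q (List.mem_cons_of_mem _ hq))]
    unfold bInner
    cases hr : REVERSE_MAP.get? (sec, q.1) with
    | none => rfl
    | some fk =>
      have hfk : flat_key ≠ fk := by
        intro he; subst he
        have h2 := rev_sound _ _ hr
        rw [hs] at h2
        have h3 : (sec, q.1) = (s, f) := by
          injection h2 with h4; exact h4.symm
        exact hne q (by simp) h3
      rw [PySem.Dict.get?_insert_of_ne _ _ hfk]

-- the inner pass over the target section computes exactly A's inner lookup (fields nodup)
theorem inner_hit (flat_key s f : String) (hs : SCHEMA_MAP.get? flat_key = some (s, f))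
    (inner : List (String × String)) (flat : PySem.Dict String String)
    (hnd : (inner.map Prod.fst).Nodup) :
    (inner.foldl (bInner s) flat).get? flat_key =
      match (PySem.Dict.mk inner).get? f with
      | some v => some v
      | none => flat.get? flat_key := by
  induction inner generalizing flat with
  | nil => rfl
  | cons q rest ih =>
    obtain ⟨g, v⟩ := q
    simp only [List.map, List.nodup_cons] at hnd
    simp only [List.foldl]
    by_cases hgf : g = f
    · subst hgf
      have hb : bInner s flat (g, v) = flat.insert flat_key v := by
        unfold bInner
        rw [rev_complete _ _ hs]
      rw [hb, inner_skip flat_key s g hs s rest _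
          (fun q hq he => hnd.1 (by
            have h5 : q.1 = g := by injection he
            exact h5 ▸ List.mem_map_of_mem hq))]
      rw [PySem.Dict.get?_insert_self, PySem.Dict.get?_mk_cons]
      simp
    · have hb : (bInner s flat (g, v)).get? flat_key = flat.get? flat_key := by
        unfold bInner
        cases hr : REVERSE_MAP.get? (s, g) with
        | none => rfl
        | some fk =>
          have hfk : flat_key ≠ fk := by
            intro he; subst he
            have h2 := rev_sound _ _ hr
            rw [hs] at h2
            injection h2 with h4
            exact hgf (congrArg Prod.snd h4.symm)
          exact PySem.Dict.get?_insert_of_ne _ _ hfk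
      rw [ih _ hnd.2, PySem.Dict.get?_mk_cons, hb]
      simp [hgf]

-- an outer pass over sections other than the target section preserves flat.get? flat_key
theorem outer_skip (flat_key s f : String) (hs : SCHEMA_MAP.get? flat_key = some (s, f))
    (recs : List (String × List (String × String))) (flat : PySem.Dict String String)
    (hne : ∀ p ∈ recs, p.1 ≠ s) :
    (recs.foldl bOuter flat).get? flat_key = flat.get? flat_key := by
  induction recs generalizing flat with
  | nil => rfl
  | cons p rest ih =>
    simp only [List.foldl]
    rw [ih _ (fun p hp => hne p (List.mem_cons_of_mem _ hp))]
    exact inner_skip flat_key s f hs p.1 p.2 flat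
      (fun q hq he => hne p (by simp) (by injection he))

-- the flattening pass computes exactly A's two-step lookup (keys nodup at both levels)
theorem outer_main (flat_key s f : String) (hs : SCHEMA_MAP.get? flat_key = some (s, f))
    (recs : List (String × List (String × String))) (flat : PySem.Dict String String)
    (hnd : (recs.map Prod.fst).Nodup) (hin : ∀ p ∈ recs, (p.2.map Prod.fst).Nodup) :
    (recs.foldl bOuter flat).get? flat_key =
      match (PySem.Dict.mk recs).get? s with
      | some d =>
        match (PySem.Dict.mk d).get? f with
        | some v => some v
        | none => flat.get? flat_key
      | none => flat.get? flat_key := by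
  induction recs generalizing flat with
  | nil => rfl
  | cons p rest ih =>
    obtain ⟨sec, inner⟩ := p
    simp only [List.map, List.nodup_cons] at hnd
    simp only [List.foldl]
    rw [PySem.Dict.get?_mk_cons]
    by_cases hsec : sec = s
    · subst hsec
      rw [outer_skip flat_key sec f hs rest _
          (fun p hp he => hnd.1 (he ▸ List.mem_map_of_mem hp))]
      unfold bOuter
      rw [inner_hit flat_key sec f hs inner flat (hin (sec, inner) (by simp))]
      simp
    · have heq : (sec == s) = false := by simp [hsec]
      rw [heq]
      have hb : (bOuter flat (sec, inner)).get? flat_key = flat.get? flat_key := by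
        unfold bOuter
        exact inner_skip flat_key s f hs sec inner flat
          (fun q hq he => hsec (by injection he))
      rw [ih _ hnd.2 (fun p hp => hin p (List.mem_cons_of_mem _ hp))]
      simp only [hb, Bool.false_eq_true, if_false]

-- ===== VERDICT (by name: the statement is the Claim_ definition above) =====
theorem get_nested_val_spec : Claim_equal_get_nested_val := by
  intro record flat_key _ hpre
  unfold Spec_get_nested_val get_nested_val get_nested_val_alt
  cases h : SCHEMA_MAP.get? flat_key with
  | none => simp
  | some path =>
    obtain ⟨s, f⟩ := path
    simp only [Option.isNone_some, Bool.false_eq_true, if_false]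
    rw [outer_main flat_key s f h record PySem.Dict.empty hpre.2.1 hpre.2.2]
    simp only [List.foldl, aStep]
    cases h1 : (PySem.Dict.mk record).get? s with
    | none => simp [PySem.Dict.get?_empty]
    | some d =>
      cases h2 : (PySem.Dict.mk d).get? f with
      | none => simp [h2]
      | some v => simp [h2]
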